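-- pv_equiv track=rewrite | github.com/ravenoak/devsynth | src/devsynth/domain/models/wsde_enhanced_dialectical.py | _categorize_critiques_by_domain
-- ===== SOURCE A (Python) =====
-- def _categorize_critiques_by_domain(critiques: list[str]) -> dict[str, list[str]]:
--     categories: dict[str, list[str]] = {
--         "security": [],
--         "performance": [],
--         "error_handling": [],
--         "input_validation": [],
--         "code_quality": [],
--         "clarity": [],
--         "examples": [],
--         "structure": [],
--     }
--     for c in critiques:
--         lc = c.lower()
--         if any(k in lc for k in ["xss", "sql", "injection", "secret", "auth"]):
--             categories["security"].append(c)
--         elif any(k in lc for k in ["speed", "slow", "optimiz", "performance"]):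
--             categories["performance"].append(c)
--         elif "exception" in lc or "error" in lc:
--             categories["error_handling"].append(c)
--         elif "validate" in lc or "sanitiz" in lc:
--             categories["input_validation"].append(c)
--         elif any(
--             k in lc for k in ["lint", "format", "pep8", "readability", "complexity"]
--         ):
--             categories["code_quality"].append(c)
--         elif any(k in lc for k in ["unclear", "confusing", "clarity"]):
--             categories["clarity"].append(c)
--         elif any(k in lc for k in ["example", "sample"]):
--             categories["examples"].append(c)
--         elif any(k in lc for k in ["structure", "organize", "section"]):
--             categories["structure"].append(c)
--         else:
--             categories["code_quality"].append(c)
--     return categories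
-- ===== SOURCE B (Python) =====
-- _RULES = [
--     ("security", ("xss", "sql", "injection", "secret", "auth")),
--     ("performance", ("speed", "slow", "optimiz", "performance")),
--     ("error_handling", ("exception", "error")),
--     ("input_validation", ("validate", "sanitiz")),
--     ("code_quality", ("lint", "format", "pep8", "readability", "complexity")),
--     ("clarity", ("unclear", "confusing", "clarity")),
--     ("examples", ("example", "sample")),
--     ("structure", ("structure", "organize", "section")),
-- ]
--
--
-- def _category(c: str) -> str:
--     lc = c.lower()
--     return next(
--         (cat for cat, kws in _RULES if any(k in lc for k in kws)), "code_quality"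
--     )
--
--
-- def _categorize_critiques_by_domain(critiques: list[str]) -> dict[str, list[str]]:
--     return {cat: [c for c in critiques if _category(c) == cat] for cat, _ in _RULES}
-- ===== Notes on version B (the rewrite author's own statement) =====
-- stated objective: idiomatic
-- what changed: Replaces the eight-way if/elif cascade with repeated in-place bucket appends by an ordered rules table: a first-match classifier over the table plus a per-category dict comprehension that filters the critiques once per bucket.
import Mathlib
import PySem

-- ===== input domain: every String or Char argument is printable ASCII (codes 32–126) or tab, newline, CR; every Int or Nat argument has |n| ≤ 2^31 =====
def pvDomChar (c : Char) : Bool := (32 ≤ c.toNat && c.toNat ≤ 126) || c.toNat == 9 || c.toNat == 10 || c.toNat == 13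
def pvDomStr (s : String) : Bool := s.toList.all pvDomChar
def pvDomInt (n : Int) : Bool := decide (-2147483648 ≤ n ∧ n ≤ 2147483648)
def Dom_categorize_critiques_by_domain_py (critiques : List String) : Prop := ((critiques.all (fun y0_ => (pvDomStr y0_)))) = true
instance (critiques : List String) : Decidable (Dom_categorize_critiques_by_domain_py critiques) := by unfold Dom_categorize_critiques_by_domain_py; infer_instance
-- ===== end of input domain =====

-- B replaces A's if/elif cascade of in-place bucket appends by an ordered rules table with a
-- first-match classifier and one per-category filter pass (idiomatic; same cost).

-- ===== PORT A =====
-- one loop iteration: lower the critique, walk the if/elif cascade, append to that bucket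
def pvStepA (d : PySem.Dict String (List String)) (c : String) : PySem.Dict String (List String) :=
  let lc := PySem.Str.lower c
  if (["xss", "sql", "injection", "secret", "auth"].any fun k => PySem.Str.isIn k lc) then
    d.modify "security" [] (· ++ [c])
  else if (["speed", "slow", "optimiz", "performance"].any fun k => PySem.Str.isIn k lc) then
    d.modify "performance" [] (· ++ [c])
  else if PySem.Str.isIn "exception" lc || PySem.Str.isIn "error" lc then
    d.modify "error_handling" [] (· ++ [c])
  else if PySem.Str.isIn "validate" lc || PySem.Str.isIn "sanitiz" lc then
    d.modify "input_validation" [] (· ++ [c])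
  else if (["lint", "format", "pep8", "readability", "complexity"].any fun k => PySem.Str.isIn k lc) then
    d.modify "code_quality" [] (· ++ [c])
  else if (["unclear", "confusing", "clarity"].any fun k => PySem.Str.isIn k lc) then
    d.modify "clarity" [] (· ++ [c])
  else if (["example", "sample"].any fun k => PySem.Str.isIn k lc) then
    d.modify "examples" [] (· ++ [c])
  else if (["structure", "organize", "section"].any fun k => PySem.Str.isIn k lc) then
    d.modify "structure" [] (· ++ [c])
  else
    d.modify "code_quality" [] (· ++ [c])

-- the literal dict A starts from (all eight buckets empty, in declaration order)
def pvInitA : PySem.Dict String (List String) :=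
  PySem.Dict.ofList
    [("security", []), ("performance", []), ("error_handling", []),
     ("input_validation", []), ("code_quality", []), ("clarity", []),
     ("examples", []), ("structure", [])]

def categorize_critiques_by_domain_py (critiques : List String) : List (String × List String) :=
  (critiques.foldl pvStepA pvInitA).items

-- ===== PORT B =====
def pvRules : List (String × List String) :=
  [("security", ["xss", "sql", "injection", "secret", "auth"]),
   ("performance", ["speed", "slow", "optimiz", "performance"]),
   ("error_handling", ["exception", "error"]),
   ("input_validation", ["validate", "sanitiz"]),
   ("code_quality", ["lint", "format", "pep8", "readability", "complexity"]),
   ("clarity", ["unclear", "confusing", "clarity"]),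
   ("examples", ["example", "sample"]),
   ("structure", ["structure", "organize", "section"])]

-- Source B's next(...): scan the rules for the first whose keyword list hits the lowered critique
def pvFirstCat (lc : String) : List (String × List String) → Option String
  | [] => none
  | r :: rs => if r.2.any (fun k => PySem.Str.isIn k lc) then some r.1 else pvFirstCat lc rs

def pvCategory (c : String) : String :=
  (pvFirstCat (PySem.Str.lower c) pvRules).getD "code_quality"

def categorize_critiques_by_domain_py_alt (critiques : List String) : List (String × List String) :=
  pvRules.map fun r => (r.1, critiques.filter fun c => pvCategory c == r.1)

-- ===== PRECONDITION & SPEC =====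
def Spec_categorize_critiques_by_domain_py (critiques : List String) (out : List (String × List String)) : Prop := out = categorize_critiques_by_domain_py_alt critiques
instance (critiques : List String) (out : List (String × List String)) : Decidable (Spec_categorize_critiques_by_domain_py critiques out) := by unfold Spec_categorize_critiques_by_domain_py; infer_instance

-- ===== CLAIM (what is proved, stated in full; the proofs are below) =====
def Claim_equal_categorize_critiques_by_domain_py : Prop := ∀ (critiques : List String), Dom_categorize_critiques_by_domain_py critiques → Spec_categorize_critiques_by_domain_py critiques (categorize_critiques_by_domain_py critiques)

-- ===== LEMMAS AND PROOFS =====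

-- shorthand for the dict state: eight fixed keys with arbitrary bucket contents
def pvD (s p e i q cl ex st : List String) : PySem.Dict String (List String) :=
  PySem.Dict.mk
    [("security", s), ("performance", p), ("error_handling", e),
     ("input_validation", i), ("code_quality", q), ("clarity", cl),
     ("examples", ex), ("structure", st)]

theorem pvMod_sec (s p e i q cl ex st : List String) (f : List String → List String) :
    (pvD s p e i q cl ex st).modify "security" [] f = pvD (f s) p e i q cl ex st := rfl
theorem pvMod_perf (s p e i q cl ex st : List String) (f : List String → List String) :
    (pvD s p e i q cl ex st).modify "performance" [] f = pvD s (f p) e i q cl ex st := rfl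
theorem pvMod_err (s p e i q cl ex st : List String) (f : List String → List String) :
    (pvD s p e i q cl ex st).modify "error_handling" [] f = pvD s p (f e) i q cl ex st := rfl
theorem pvMod_inp (s p e i q cl ex st : List String) (f : List String → List String) :
    (pvD s p e i q cl ex st).modify "input_validation" [] f = pvD s p e (f i) q cl ex st := rfl
theorem pvMod_qual (s p e i q cl ex st : List String) (f : List String → List String) :
    (pvD s p e i q cl ex st).modify "code_quality" [] f = pvD s p e i (f q) cl ex st := rfl
theorem pvMod_clar (s p e i q cl ex st : List String) (f : List String → List String) :
    (pvD s p e i q cl ex st).modify "clarity" [] f = pvD s p e i q (f cl) ex st := rfl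
theorem pvMod_exm (s p e i q cl ex st : List String) (f : List String → List String) :
    (pvD s p e i q cl ex st).modify "examples" [] f = pvD s p e i q cl (f ex) st := rfl
theorem pvMod_str (s p e i q cl ex st : List String) (f : List String → List String) :
    (pvD s p e i q cl ex st).modify "structure" [] f = pvD s p e i q cl ex (f st) := rfl

-- A's cascade step is exactly: append c to the bucket B's classifier picks
theorem pvStepA_eq_modify (d : PySem.Dict String (List String)) (c : String) :
    pvStepA d c = d.modify (pvCategory c) [] (· ++ [c]) := by
  simp only [pvStepA, pvCategory, pvRules, pvFirstCat, List.any, Bool.or_false]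
  split_ifs <;> rfl

-- pvCategory always lands in one of the eight keys
theorem pvCategory_cases (c : String) :
    pvCategory c = "security" ∨ pvCategory c = "performance" ∨
    pvCategory c = "error_handling" ∨ pvCategory c = "input_validation" ∨
    pvCategory c = "code_quality" ∨ pvCategory c = "clarity" ∨
    pvCategory c = "examples" ∨ pvCategory c = "structure" := by
  simp only [pvCategory, pvRules, pvFirstCat, List.any, Bool.or_false]
  split_ifs <;> simp

-- loop invariant: the dict state after processing l, starting from arbitrary buckets
theorem pvLoop_inv (l : List String) (s p e i q cl ex st : List String) :
    l.foldl pvStepA (pvD s p e i q cl ex st) =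
    pvD (s ++ l.filter fun c => pvCategory c == "security")
        (p ++ l.filter fun c => pvCategory c == "performance")
        (e ++ l.filter fun c => pvCategory c == "error_handling")
        (i ++ l.filter fun c => pvCategory c == "input_validation")
        (q ++ l.filter fun c => pvCategory c == "code_quality")
        (cl ++ l.filter fun c => pvCategory c == "clarity")
        (ex ++ l.filter fun c => pvCategory c == "examples")
        (st ++ l.filter fun c => pvCategory c == "structure") := by
  induction l generalizing s p e i q cl ex st with
  | nil => simp
  | cons c l ih =>
    rw [List.foldl_cons, pvStepA_eq_modify]
    rcases pvCategory_cases c with h | h | h | h | h | h | h | h <;> rw [h] <;>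
      simp only [pvMod_sec, pvMod_perf, pvMod_err, pvMod_inp, pvMod_qual, pvMod_clar,
        pvMod_exm, pvMod_str, ih, List.filter_cons, h] <;>
      norm_num [pvD, List.append_assoc] <;> decide

-- ===== VERDICT (by name: the statement is the Claim_ definition above) =====
theorem categorize_critiques_by_domain_py_spec : Claim_equal_categorize_critiques_by_domain_py := by
  intro critiques _
  unfold Spec_categorize_critiques_by_domain_py categorize_critiques_by_domain_py
    categorize_critiques_by_domain_py_alt
  rw [show pvInitA = pvD [] [] [] [] [] [] [] [] from rfl, pvLoop_inv]
  simp [pvD, pvRules]
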